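-- pv_equiv track=rewrite | github.com/jamesaoverton/cmi-pb-terminology | src/script/load.py | get_SQL_type
-- ===== SOURCE A (Python) =====
-- class ConfigError(Exception):
--     pass
--
-- def get_SQL_type(config, datatype):
--     """Given the config structure and the name of a datatype, climb the datatype tree (as required),
--     and return the first 'SQL type' found."""
--     if "datatype" not in config:
--         raise ConfigError("Missing datatypes in config")
--     if datatype not in config["datatype"]:
--         return None
--     if config["datatype"][datatype]["SQL type"]:
--         return config["datatype"][datatype]["SQL type"]
--     return get_SQL_type(config, config["datatype"][datatype]["parent"])
-- ===== SOURCE B (Python) =====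
-- class ConfigError(Exception):
--     pass
--
--
-- def get_SQL_type(config, datatype):
--     """Resolve the SQL type of every datatype bottom-up by one relaxation table,
--     then answer the query with a single lookup."""
--     if "datatype" not in config:
--         raise ConfigError("Missing datatypes in config")
--     dts = config["datatype"]
--     if datatype not in dts:
--         return None
--     resolved = {}
--     for name, entry in dts.items():
--         if entry.get("SQL type"):
--             resolved[name] = entry.get("SQL type")
--     for _ in range(len(dts)):
--         for name, entry in dts.items():
--             if name not in resolved:
--                 p = entry.get("parent")
--                 if p not in dts:
--                     resolved[name] = None
--                 elif p in resolved:
--                     resolved[name] = resolved[p]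
--     return resolved.get(datatype)
-- ===== Notes on version B (the rewrite author's own statement) =====
-- stated objective: alternative
-- what changed: A climbs the parent chain by recursion from the queried datatype; B instead builds a resolution table for all datatypes bottom-up by repeated relaxation passes (truthy 'SQL type' entries seed the table, each pass copies a parent's resolved value or records None for a parent outside the config) and answers the query with one lookup.
import Mathlib
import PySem

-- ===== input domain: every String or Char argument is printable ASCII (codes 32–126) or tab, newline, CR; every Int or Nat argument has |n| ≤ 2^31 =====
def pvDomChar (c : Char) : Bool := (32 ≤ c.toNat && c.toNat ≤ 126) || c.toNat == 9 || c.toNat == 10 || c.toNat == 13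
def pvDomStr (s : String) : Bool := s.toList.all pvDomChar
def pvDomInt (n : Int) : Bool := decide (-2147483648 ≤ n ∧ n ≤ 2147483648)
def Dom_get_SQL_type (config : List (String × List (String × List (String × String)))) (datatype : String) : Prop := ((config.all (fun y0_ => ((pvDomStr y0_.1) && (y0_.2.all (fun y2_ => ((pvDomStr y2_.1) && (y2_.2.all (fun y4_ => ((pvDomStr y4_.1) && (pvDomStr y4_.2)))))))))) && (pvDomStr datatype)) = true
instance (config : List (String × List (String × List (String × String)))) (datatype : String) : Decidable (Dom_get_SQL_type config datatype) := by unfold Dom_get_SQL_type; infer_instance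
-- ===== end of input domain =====

-- B replaces A's recursive climb of the parent chain by a bottom-up relaxation table over all
-- datatypes, answered by a single lookup (objective: alternative; same return value on Pre_).

-- shared primitive: a Python dict lookup on a dict built from an association list (dict(pairs).get(k))
def pvLook {α : Type} (l : List (String × α)) (k : String) : Option α :=
  (PySem.Dict.ofList l).get? k

-- truthiness of entry.get("SQL type"): the looked-up string, falsy (None or "") ↔ getD "" = ""
def pvSql (e : List (String × String)) : String :=
  (pvLook e "SQL type").getD ""

-- ===== PORT A =====
-- A's recursion on the datatype name; fuel |dts|+1 only makes the recursion total in Lean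
-- (under Pre_ the climb terminates within |dts| steps, so the fuel is never exhausted;
-- outside Pre_ A raises).
def pvGoA (dts : PySem.Dict String (List (String × String))) : Nat → String → Option String
  | 0, _ => none
  | fuel+1, name =>
    match dts.get? name with
    | none => none                                  -- "if datatype not in config['datatype']: return None"
    | some e =>
      if pvSql e ≠ "" then some (pvSql e)           -- "if …['SQL type']: return …['SQL type']"
      else pvGoA dts fuel ((pvLook e "parent").getD "")  -- "return get_SQL_type(config, …['parent'])"

def get_SQL_type (config : List (String × List (String × List (String × String)))) (datatype : String) : Option String :=
  match pvLook config "datatype" with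
  | none => none                                    -- "raise ConfigError": excluded by Pre_
  | some dtsRaw =>
    let dts := PySem.Dict.ofList dtsRaw
    pvGoA dts (dts.items.length + 1) datatype

-- ===== PORT B =====
-- resolved = {} ; for name, entry in dts.items(): if entry.get("SQL type"): resolved[name] = entry.get("SQL type")
def pvAltInit (dts : PySem.Dict String (List (String × String))) : PySem.Dict String (Option String) :=
  dts.items.foldl
    (fun r p => if pvSql p.2 ≠ "" then r.insert p.1 (some (pvSql p.2)) else r)
    PySem.Dict.empty

-- body of the inner "for name, entry in dts.items()" of a relaxation pass
def pvAltStep (dts : PySem.Dict String (List (String × String)))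
    (r : PySem.Dict String (Option String)) (p : String × List (String × String)) :
    PySem.Dict String (Option String) :=
  if (r.get? p.1).isSome then r                     -- "if name not in resolved" fails
  else
    match pvLook p.2 "parent" with
    | none => r.insert p.1 none                     -- p is None, "if p not in dts"
    | some par =>
      if (dts.get? par).isNone then r.insert p.1 none   -- "if p not in dts"
      else
        match r.get? par with
        | some v => r.insert p.1 v                  -- "elif p in resolved"
        | none => r

def pvAltRound (dts : PySem.Dict String (List (String × String)))
    (r : PySem.Dict String (Option String)) : PySem.Dict String (Option String) :=
  dts.items.foldl (pvAltStep dts) r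

-- "for _ in range(len(dts))": k passes after the seeding pass
def pvAltIter (dts : PySem.Dict String (List (String × String))) : Nat → PySem.Dict String (Option String)
  | 0 => pvAltInit dts
  | k+1 => pvAltRound dts (pvAltIter dts k)

def get_SQL_type_alt (config : List (String × List (String × List (String × String)))) (datatype : String) : Option String :=
  match pvLook config "datatype" with
  | none => none                                    -- "raise ConfigError": excluded by Pre_
  | some dtsRaw =>
    let dts := PySem.Dict.ofList dtsRaw
    match dts.get? datatype with
    | none => none                                  -- "if datatype not in dts: return None"
    | some _ =>
      match (pvAltIter dts dts.items.length).get? datatype with   -- "return resolved.get(datatype)"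
      | none => none
      | some v => v

-- ===== PRECONDITION & SPEC =====
-- a node A can climb THROUGH: entry present, "SQL type" key present but falsy, "parent" key present
def pvOkNode (dts : PySem.Dict String (List (String × String))) (n : String) : Bool :=
  match dts.get? n with
  | none => false
  | some e => (pvLook e "SQL type").isSome && (pvSql e == "") && (pvLook e "parent").isSome

-- a node A STOPS at: absent from the config (→ None), or a truthy "SQL type" (→ that value)
def pvTermNode (dts : PySem.Dict String (List (String × String))) (n : String) : Bool :=
  match dts.get? n with
  | none => true
  | some e => !(pvSql e == "")

-- one edge of the parent graph of the input: defined (only) on names whose entry has a falsy "SQL type"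
def pvStep (dts : PySem.Dict String (List (String × String))) (n : String) : Option String :=
  match dts.get? n with
  | none => none
  | some e => if pvSql e ≠ "" then none else pvLook e "parent"

-- k-fold composition of pvStep (pvIter dts k n = the k-th ancestor of n, if the walk goes that far)
def pvIter (dts : PySem.Dict String (List (String × String))) (k : Nat) (n : String) : Option String :=
  (fun o => o.bind (pvStep dts))^[k] (some n)

-- Pre_ excludes exactly the inputs on which A raises: a config without the "datatype" key
-- (ConfigError), and — when the queried name is present — a parent chain from it that does not
-- reach a stopping node (absent name or truthy "SQL type") through well-formed entries: a visited
-- entry missing the "SQL type" key, or missing the "parent" key when "SQL type" is falsy, is a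
-- KeyError, and a chain that never stops (a cycle) is a RecursionError.  A clean stop, if any,
-- happens within |dts| steps (the visited names are distinct keys), so the bound loses nothing.
def Pre_get_SQL_type (config : List (String × List (String × List (String × String)))) (datatype : String) : Prop :=
  (pvLook config "datatype").isSome ∧
  ∀ dtsRaw ∈ pvLook config "datatype",
    ((PySem.Dict.ofList dtsRaw).get? datatype).isSome →
      ∃ k ∈ List.range ((PySem.Dict.ofList dtsRaw).items.length + 1),
        (∀ j ∈ List.range k,
          (pvIter (PySem.Dict.ofList dtsRaw) j datatype).all (pvOkNode (PySem.Dict.ofList dtsRaw)) = true) ∧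
        (pvIter (PySem.Dict.ofList dtsRaw) k datatype).all (pvTermNode (PySem.Dict.ofList dtsRaw)) = true

instance (config : List (String × List (String × List (String × String)))) (datatype : String) :
    Decidable (Pre_get_SQL_type config datatype) := by
  unfold Pre_get_SQL_type; infer_instance

def pvWitness_get_SQL_type : (List (String × List (String × List (String × String)))) × String :=
  ([("datatype", [("text", [("SQL type", "TEXT"), ("parent", "")])])], "text")

def Spec_get_SQL_type (config : List (String × List (String × List (String × String)))) (datatype : String) (out : Option String) : Prop := out = get_SQL_type_alt config datatype
instance (config : List (String × List (String × List (String × String)))) (datatype : String) (out : Option String) : Decidable (Spec_get_SQL_type config datatype out) := by unfold Spec_get_SQL_type; infer_instance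

-- ===== CLAIM (what is proved, stated in full; the proofs are below) =====
def Claim_equal_get_SQL_type : Prop := ∀ (config : List (String × List (String × List (String × String)))) (datatype : String), Dom_get_SQL_type config datatype → Pre_get_SQL_type config datatype → Spec_get_SQL_type config datatype (get_SQL_type config datatype)

-- ===== LEMMAS AND PROOFS =====

-- what A returns at the stopping node of the chain
def pvAns (dts : PySem.Dict String (List (String × String))) (m : String) : Option String :=
  match dts.get? m with
  | none => none
  | some e => some (pvSql e)

theorem pvIter_zero (dts : PySem.Dict String (List (String × String))) (n : String) :
    pvIter dts 0 n = some n := rfl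

theorem pvIter_bind_none (dts : PySem.Dict String (List (String × String))) :
    ∀ k, (fun o => o.bind (pvStep dts))^[k] (none : Option String) = none
  | 0 => rfl
  | k+1 => by
    rw [Function.iterate_succ_apply]
    simpa using pvIter_bind_none dts k

-- step at the front of the walk
theorem pvIter_succ (dts : PySem.Dict String (List (String × String))) (k : Nat) (n : String) :
    pvIter dts (k+1) n = (pvStep dts n).bind (pvIter dts k) := by
  unfold pvIter
  rw [Function.iterate_succ_apply]
  cases h : pvStep dts n with
  | none => simp [h, pvIter_bind_none]
  | some m => simp [h]

-- step at the back of the walk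
theorem pvIter_snoc (dts : PySem.Dict String (List (String × String))) (k : Nat) (n : String) :
    pvIter dts (k+1) n = (pvIter dts k n).bind (pvStep dts) := by
  unfold pvIter
  rw [Function.iterate_succ_apply']

-- an Ok node steps to its parent
theorem pvOk_step (dts : PySem.Dict String (List (String × String))) (n : String)
    (h : pvOkNode dts n = true) :
    ∃ e par, dts.get? n = some e ∧ pvSql e = "" ∧ pvLook e "parent" = some par ∧
      pvStep dts n = some par := by
  unfold pvOkNode at h
  cases hg : dts.get? n with
  | none => rw [hg] at h; cases h
  | some e =>
    rw [hg] at h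
    simp only [Bool.and_eq_true, beq_iff_eq, Option.isSome_iff_exists] at h
    obtain ⟨⟨_, hsql⟩, par, hpar⟩ := h
    exact ⟨e, par, rfl, hsql, hpar, by simp [pvStep, hg, hsql, hpar]⟩

-- A's recursion evaluates to the answer at the stopping node, for any sufficient fuel
theorem pvGoA_eval (dts : PySem.Dict String (List (String × String))) :
    ∀ (k : Nat) (n0 : String) (f : Nat) (t : String),
      (∀ j < k, ∀ m, pvIter dts j n0 = some m → pvOkNode dts m = true) →
      (∀ m, pvIter dts k n0 = some m → pvTermNode dts m = true) →
      k + 1 ≤ f → pvIter dts k n0 = some t →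
      pvGoA dts f n0 = pvAns dts t := by
  intro k
  induction k with
  | zero =>
    intro n0 f t _ hterm hf ht
    rw [pvIter_zero] at ht
    injection ht with ht; subst ht
    obtain ⟨f, rfl⟩ : ∃ f', f = f' + 1 := ⟨f - 1, by omega⟩
    have htn := hterm n0 (pvIter_zero dts n0)
    unfold pvTermNode at htn
    unfold pvGoA pvAns
    cases hg : dts.get? n0 with
    | none => simp
    | some e =>
      rw [hg] at htn
      simp only [Bool.not_eq_eq_eq_not, Bool.not_true, beq_eq_false_iff_ne] at htn
      simp [htn]
  | succ k ih =>
    intro n0 f t hok hterm hf ht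
    obtain ⟨e, par, hg, hsql, hpar, hstep⟩ :=
      pvOk_step dts n0 (hok 0 (Nat.succ_pos k) n0 (pvIter_zero dts n0))
    have hshift : ∀ j, pvIter dts (j+1) n0 = pvIter dts j par := by
      intro j; rw [pvIter_succ, hstep]; rfl
    obtain ⟨f, rfl⟩ : ∃ f', f = f' + 1 := ⟨f - 1, by omega⟩
    unfold pvGoA
    rw [hg]
    simp only [hsql, ne_eq, not_true_eq_false, if_false, hpar, Option.getD_some]
    exact ih par f t
      (fun j hj m hm => hok (j+1) (by omega) m (by rw [hshift]; exact hm))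
      (fun m hm => hterm m (by rw [hshift]; exact hm))
      (by omega)
      (by rw [← hshift]; exact ht)

-- the walk reaches step k when all earlier nodes are Ok
theorem pvIter_isSome (dts : PySem.Dict String (List (String × String))) :
    ∀ (k : Nat) (n0 : String),
      (∀ j < k, ∀ m, pvIter dts j n0 = some m → pvOkNode dts m = true) →
      (pvIter dts k n0).isSome := by
  intro k
  induction k with
  | zero => intro n0 _; simp [pvIter_zero]
  | succ k ih =>
    intro n0 hok
    obtain ⟨e, par, hg, hsql, hpar, hstep⟩ :=
      pvOk_step dts n0 (hok 0 (Nat.succ_pos k) n0 (pvIter_zero dts n0))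
    have hshift : ∀ j, pvIter dts (j+1) n0 = pvIter dts j par := by
      intro j; rw [pvIter_succ, hstep]; rfl
    rw [hshift]
    exact ih par (fun j hj m hm => hok (j+1) (by omega) m (by rw [hshift]; exact hm))

-- ---- B's table: bookkeeping lemmas ----

def pvInitSub (dts : PySem.Dict String (List (String × String)))
    (r : PySem.Dict String (Option String)) : Prop :=
  ∀ n v, (pvAltInit dts).get? n = some v → r.get? n = some v

theorem pvInit_no_key (n : String) :
    ∀ (l : List (String × List (String × String))) (d : PySem.Dict String (Option String)),
      (∀ p ∈ l, p.1 ≠ n) →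
      (l.foldl (fun r p => if pvSql p.2 ≠ "" then r.insert p.1 (some (pvSql p.2)) else r) d).get? n
        = d.get? n := by
  intro l
  induction l with
  | nil => intro d h; simp
  | cons q l ih =>
    intro d h
    simp only [List.foldl_cons]
    rw [ih _ (fun p hp => h p (List.mem_cons_of_mem q hp))]
    have hq : q.1 ≠ n := h q (by simp)
    by_cases hs : pvSql q.2 ≠ ""
    · rw [if_pos hs, PySem.Dict.get?_insert, if_neg (Ne.symm hq)]
    · rw [if_neg hs]

theorem pvInit_mem (n : String) (e : List (String × String)) :
    ∀ (l : List (String × List (String × String))) (d : PySem.Dict String (Option String)),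
      (n, e) ∈ l → (l.map Prod.fst).Nodup → d.get? n = none →
      (l.foldl (fun r p => if pvSql p.2 ≠ "" then r.insert p.1 (some (pvSql p.2)) else r) d).get? n
        = (if pvSql e ≠ "" then some (some (pvSql e)) else none) := by
  intro l
  induction l with
  | nil => intro d h; simp at h
  | cons q l ih =>
    intro d hmem hnd hdn
    simp only [List.map_cons, List.nodup_cons] at hnd
    rcases List.mem_cons.mp hmem with hq | hmem'
    · subst hq
      simp only [List.foldl_cons]
      have hnol : ∀ p ∈ l, p.1 ≠ n := by
        intro p hp hpn
        have hmm : n ∈ List.map Prod.fst l := by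
          rw [← hpn]; exact List.mem_map_of_mem hp
        exact hnd.1 hmm
      rw [pvInit_no_key n l _ hnol]
      by_cases hs : pvSql e ≠ ""
      · rw [if_pos hs, if_pos hs, PySem.Dict.get?_insert, if_pos rfl]
      · rw [if_neg hs, if_neg hs, hdn]
    · have hq : q.1 ≠ n := by
        intro hqn
        exact hnd.1 (by rw [hqn]; exact List.mem_map_of_mem hmem')
      simp only [List.foldl_cons]
      apply ih _ hmem' hnd.2
      by_cases hs : pvSql q.2 ≠ ""
      · rw [if_pos hs, PySem.Dict.get?_insert, if_neg (Ne.symm hq), hdn]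
      · rw [if_neg hs, hdn]

theorem pvInit_get (dts : PySem.Dict String (List (String × String))) (hnd : dts.keys.Nodup)
    (n : String) (e : List (String × String)) (h : dts.get? n = some e) :
    (pvAltInit dts).get? n = (if pvSql e ≠ "" then some (some (pvSql e)) else none) := by
  have hmem := PySem.Dict.mem_items_of_get?_eq_some _ h
  have hnd' : (dts.items.map Prod.fst).Nodup := by
    simpa [PySem.Dict.keys] using hnd
  unfold pvAltInit
  exact pvInit_mem n e dts.items _ hmem hnd' (PySem.Dict.get?_empty n)

theorem pvInit_none (dts : PySem.Dict String (List (String × String)))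
    (n : String) (h : n ∉ dts.keys) :
    (pvAltInit dts).get? n = none := by
  unfold pvAltInit
  rw [pvInit_no_key n dts.items _ ?_]
  · exact PySem.Dict.get?_empty n
  · intro p hp hpn
    apply h
    rw [← hpn]
    exact PySem.Dict.mem_keys_of_mem_items dts hp

theorem pvStep_mono (dts : PySem.Dict String (List (String × String)))
    (r : PySem.Dict String (Option String)) (p : String × List (String × String))
    (n : String) (v : Option String) (h : r.get? n = some v) :
    (pvAltStep dts r p).get? n = some v := by
  unfold pvAltStep
  by_cases hg : (r.get? p.1).isSome
  · rw [if_pos hg]; exact h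
  · rw [if_neg hg]
    have hne : n ≠ p.1 := by
      intro hnp
      rw [← hnp, h] at hg
      simp at hg
    cases pvLook p.2 "parent" with
    | none => simp only []; rw [PySem.Dict.get?_insert, if_neg hne]; exact h
    | some par =>
      simp only []
      by_cases hdp : (dts.get? par).isNone
      · rw [if_pos hdp, PySem.Dict.get?_insert, if_neg hne]; exact h
      · rw [if_neg hdp]
        cases r.get? par with
        | none => simp only []; exact h
        | some w => simp only []; rw [PySem.Dict.get?_insert, if_neg hne]; exact h

theorem pvFold_mono (dts : PySem.Dict String (List (String × String))) (n : String) (v : Option String) :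
    ∀ (l : List (String × List (String × String))) (r : PySem.Dict String (Option String)),
      r.get? n = some v → ((l.foldl (pvAltStep dts) r).get? n) = some v := by
  intro l
  induction l with
  | nil => intro r h; simpa using h
  | cons q l ih =>
    intro r h
    simp only [List.foldl_cons]
    exact ih _ (pvStep_mono dts r q n v h)

theorem pvFold_hit (dts : PySem.Dict String (List (String × String)))
    (n : String) (e : List (String × String)) :
    ∀ (l : List (String × List (String × String))) (r : PySem.Dict String (Option String)),
      (n, e) ∈ l → (l.map Prod.fst).Nodup → r.get? n = none →
      (pvLook e "parent" = none ∨
        ∃ par, pvLook e "parent" = some par ∧ ((dts.get? par).isNone ∨ (r.get? par).isSome)) →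
      ((l.foldl (pvAltStep dts) r).get? n).isSome := by
  intro l
  induction l with
  | nil => intro r hmem _ _ _; simp at hmem
  | cons q l ih =>
    intro r hmem hnd' hrn hcond
    simp only [List.map_cons, List.nodup_cons] at hnd'
    by_cases hq : q.1 = n
    · have hqe : q = (n, e) := by
        rcases List.mem_cons.mp hmem with h1 | h2
        · exact h1.symm
        · exfalso
          apply hnd'.1
          have hmm : n ∈ List.map Prod.fst l := List.mem_map_of_mem h2
          rw [hq]; exact hmm
      subst hqe
      simp only [List.foldl_cons]
      have hgr : ((pvAltStep dts r (n, e)).get? n).isSome := by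
        unfold pvAltStep
        rw [if_neg (by simp [hrn])]
        rcases hcond with hpn | ⟨par, hpar, hcc⟩
        · rw [hpn]
          simp only []
          rw [PySem.Dict.get?_insert, if_pos rfl]
          simp
        · rw [hpar]
          simp only []
          by_cases hdp : (dts.get? par).isNone
          · rw [if_pos hdp, PySem.Dict.get?_insert, if_pos rfl]; simp
          · rw [if_neg hdp]
            have hsome : (r.get? par).isSome := hcc.resolve_left hdp
            obtain ⟨w, hw⟩ := Option.isSome_iff_exists.mp hsome
            rw [hw]
            simp only []
            rw [PySem.Dict.get?_insert, if_pos rfl]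
            simp
      obtain ⟨v, hv⟩ := Option.isSome_iff_exists.mp hgr
      rw [pvFold_mono dts n v l _ hv]
      simp
    · simp only [List.foldl_cons]
      apply ih
      · rcases List.mem_cons.mp hmem with h1 | h2
        · exact absurd (by rw [← h1]) hq
        · exact h2
      · exact hnd'.2
      · have : (pvAltStep dts r q).get? n = r.get? n := by
          unfold pvAltStep
          by_cases hg : (r.get? q.1).isSome
          · rw [if_pos hg]
          · rw [if_neg hg]
            cases pvLook q.2 "parent" with
            | none => simp only []; rw [PySem.Dict.get?_insert, if_neg (Ne.symm hq)]
            | some par =>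
              simp only []
              by_cases hdp : (dts.get? par).isNone
              · rw [if_pos hdp, PySem.Dict.get?_insert, if_neg (Ne.symm hq)]
              · rw [if_neg hdp]
                cases r.get? par with
                | none => simp only []
                | some w => simp only []; rw [PySem.Dict.get?_insert, if_neg (Ne.symm hq)]
        rw [this]; exact hrn
      · rcases hcond with hpn | ⟨par, hpar, hcc⟩
        · exact Or.inl hpn
        · refine Or.inr ⟨par, hpar, ?_⟩
          rcases hcc with h1 | h1
          · exact Or.inl h1
          · obtain ⟨w, hw⟩ := Option.isSome_iff_exists.mp h1
            exact Or.inr (by rw [pvStep_mono dts r q par w hw]; simp)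

-- ---- chain-local invariant and progress ----

-- Inv: any value the table holds at a node of the queried chain is the chain's answer
def pvInv (dts : PySem.Dict String (List (String × String))) (n0 : String) (k : Nat) (t : String)
    (r : PySem.Dict String (Option String)) : Prop :=
  ∀ j ≤ k, ∀ m, pvIter dts j n0 = some m → ∀ v, r.get? m = some v → v = pvAns dts t

theorem pvInv_init (dts : PySem.Dict String (List (String × String))) (hnd : dts.keys.Nodup)
    (n0 : String) (k : Nat) (t : String)
    (hok : ∀ j < k, ∀ m, pvIter dts j n0 = some m → pvOkNode dts m = true)
    (hterm : ∀ m, pvIter dts k n0 = some m → pvTermNode dts m = true)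
    (ht : pvIter dts k n0 = some t) :
    pvInv dts n0 k t (pvAltInit dts) := by
  intro j hj m hm v hv
  rcases Nat.lt_or_ge j k with hjk | hjk
  · obtain ⟨e, par, hg, hsql, _, _⟩ := pvOk_step dts m (hok j hjk m hm)
    rw [pvInit_get dts hnd m e hg, if_neg (by simp [hsql])] at hv
    cases hv
  · have hjk' : j = k := by omega
    subst hjk'
    rw [hm] at ht
    injection ht with ht; subst ht
    have htn := hterm m hm
    unfold pvTermNode at htn
    cases hg : dts.get? m with
    | none =>
      rw [pvInit_none dts m ((PySem.Dict.get?_eq_none_iff_not_mem_keys dts m).mp hg)] at hv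
      cases hv
    | some e =>
      rw [hg] at htn
      simp only [Bool.not_eq_eq_eq_not, Bool.not_true, beq_eq_false_iff_ne] at htn
      rw [pvInit_get dts hnd m e hg, if_pos (by simpa using htn)] at hv
      injection hv with hv
      simp [← hv, pvAns, hg]

theorem pvStep_get_ne (dts : PySem.Dict String (List (String × String)))
    (r : PySem.Dict String (Option String)) (p : String × List (String × String))
    (n : String) (h : p.1 ≠ n) :
    (pvAltStep dts r p).get? n = r.get? n := by
  unfold pvAltStep
  have hne : n ≠ p.1 := Ne.symm h
  by_cases hg : (r.get? p.1).isSome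
  · rw [if_pos hg]
  · rw [if_neg hg]
    cases pvLook p.2 "parent" with
    | none => simp only []; rw [PySem.Dict.get?_insert, if_neg hne]
    | some par =>
      simp only []
      by_cases hdp : (dts.get? par).isNone
      · rw [if_pos hdp, PySem.Dict.get?_insert, if_neg hne]
      · rw [if_neg hdp]
        cases r.get? par with
        | none => simp only []
        | some w => simp only []; rw [PySem.Dict.get?_insert, if_neg hne]

theorem pvInv_step (dts : PySem.Dict String (List (String × String))) (hnd : dts.keys.Nodup)
    (n0 : String) (k : Nat) (t : String)
    (hok : ∀ j < k, ∀ m, pvIter dts j n0 = some m → pvOkNode dts m = true)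
    (hterm : ∀ m, pvIter dts k n0 = some m → pvTermNode dts m = true)
    (ht : pvIter dts k n0 = some t)
    (r : PySem.Dict String (Option String)) (p : String × List (String × String))
    (hp : p ∈ dts.items) (hinv : pvInv dts n0 k t r) (hi : pvInitSub dts r) :
    pvInv dts n0 k t (pvAltStep dts r p) := by
  intro j hj m hm v hv
  by_cases hmp : m = p.1
  · subst hmp
    unfold pvAltStep at hv
    by_cases hg : (r.get? p.1).isSome
    · rw [if_pos hg] at hv; exact hinv j hj p.1 hm v hv
    · rw [if_neg hg] at hv
      have hpd : dts.get? p.1 = some p.2 := PySem.Dict.get?_of_mem_items dts hp hnd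
      rcases Nat.lt_or_ge j k with hjk | hjk
      · obtain ⟨e, par, hge, hsql, hpar, hstep⟩ := pvOk_step dts p.1 (hok j hjk p.1 hm)
        have hnext : pvIter dts (j+1) n0 = some par := by
          rw [pvIter_snoc, hm]; simpa using hstep
        have hee : e = p.2 := by rw [hpd] at hge; exact (Option.some.inj hge).symm
        subst hee
        rw [hpar] at hv
        simp only [] at hv
        by_cases hdp : (dts.get? par).isNone
        · rw [if_pos hdp, PySem.Dict.get?_insert, if_pos rfl] at hv
          injection hv with hv; subst hv
          -- parent absent: it must be the stopping node, and the answer is none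
          rcases Nat.lt_or_ge (j+1) k with hjk1 | hjk1
          · obtain ⟨e', _, hg', _, _, _⟩ := pvOk_step dts par (hok (j+1) hjk1 par hnext)
            rw [hg'] at hdp; cases hdp
          · have hjk1' : j + 1 = k := by omega
            rw [hjk1'] at hnext
            rw [hnext] at ht
            injection ht with ht; subst ht
            simp [pvAns, Option.isNone_iff_eq_none.mp hdp]
        · rw [if_neg hdp] at hv
          cases hrp : r.get? par with
          | none => rw [hrp] at hv; simp only [] at hv; exact hinv j hj p.1 hm v hv
          | some w =>
            rw [hrp] at hv
            simp only [] at hv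
            rw [PySem.Dict.get?_insert, if_pos rfl] at hv
            injection hv with hv; subst hv
            exact hinv (j+1) (by omega) par hnext w hrp
      · -- j = k: m is the stopping node; if present it is truthy, hence seeded, hence hg fails
        have hjk' : j = k := by omega
        subst hjk'
        rw [hm] at ht; injection ht with ht; subst ht
        have htn := hterm p.1 hm
        unfold pvTermNode at htn
        rw [hpd] at htn
        simp only [Bool.not_eq_eq_eq_not, Bool.not_true, beq_eq_false_iff_ne] at htn
        exfalso
        apply hg
        have hini := pvInit_get dts hnd p.1 p.2 hpd
        rw [if_pos (by simpa using htn)] at hini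
        rw [hi p.1 _ hini]
        simp
  · rw [pvStep_get_ne dts r p m (fun h => hmp h.symm)] at hv
    exact hinv j hj m hm v hv

theorem pvInv_fold (dts : PySem.Dict String (List (String × String))) (hnd : dts.keys.Nodup)
    (n0 : String) (k : Nat) (t : String)
    (hok : ∀ j < k, ∀ m, pvIter dts j n0 = some m → pvOkNode dts m = true)
    (hterm : ∀ m, pvIter dts k n0 = some m → pvTermNode dts m = true)
    (ht : pvIter dts k n0 = some t) :
    ∀ (l : List (String × List (String × String))) (r : PySem.Dict String (Option String)),
      (∀ p ∈ l, p ∈ dts.items) → pvInv dts n0 k t r → pvInitSub dts r →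
      pvInv dts n0 k t (l.foldl (pvAltStep dts) r) ∧ pvInitSub dts (l.foldl (pvAltStep dts) r) := by
  intro l
  induction l with
  | nil => intro r _ hinv hi; exact ⟨hinv, hi⟩
  | cons q l ih =>
    intro r h hinv hi
    simp only [List.foldl_cons]
    exact ih _ (fun p hp => h p (by simp [hp]))
      (pvInv_step dts hnd n0 k t hok hterm ht r q (h q (by simp)) hinv hi)
      (fun n v hv => pvStep_mono dts r q n v (hi n v hv))

-- Prog: after pass p the table covers chain position j once k - j ≤ p, and always covers a
-- present stopping node
theorem pvProg (dts : PySem.Dict String (List (String × String))) (hnd : dts.keys.Nodup)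
    (n0 : String) (k : Nat) (t : String)
    (hok : ∀ j < k, ∀ m, pvIter dts j n0 = some m → pvOkNode dts m = true)
    (hterm : ∀ m, pvIter dts k n0 = some m → pvTermNode dts m = true)
    (ht : pvIter dts k n0 = some t) :
    ∀ p, pvInv dts n0 k t (pvAltIter dts p) ∧ pvInitSub dts (pvAltIter dts p) ∧
      (∀ j < k, k - j ≤ p → ∀ m, pvIter dts j n0 = some m → ((pvAltIter dts p).get? m).isSome) ∧
      (∀ m, pvIter dts k n0 = some m → (dts.get? m).isSome → ((pvAltIter dts p).get? m).isSome) := by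
  intro p
  induction p with
  | zero =>
    refine ⟨pvInv_init dts hnd n0 k t hok hterm ht, fun n v h => h, ?_, ?_⟩
    · intro j hj hjp; omega
    · intro m hm hsome
      rw [hm] at ht; injection ht with ht; subst ht
      obtain ⟨e, hg⟩ := Option.isSome_iff_exists.mp hsome
      have htn := hterm m hm
      unfold pvTermNode at htn
      rw [hg] at htn
      simp only [Bool.not_eq_eq_eq_not, Bool.not_true, beq_eq_false_iff_ne] at htn
      show ((pvAltInit dts).get? m).isSome = true
      rw [pvInit_get dts hnd m e hg, if_pos (by simpa using htn)]
      simp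
  | succ p ih =>
    obtain ⟨hinv, hi, hprogA, hprogB⟩ := ih
    have hfold := pvInv_fold dts hnd n0 k t hok hterm ht dts.items (pvAltIter dts p)
      (fun q hq => hq) hinv hi
    refine ⟨hfold.1, hfold.2, ?_, ?_⟩
    · intro j hj hjp m hm
      rcases Nat.lt_or_ge (k - j) (p+1) with hlt | hge
      · obtain ⟨v, hv⟩ := Option.isSome_iff_exists.mp (hprogA j hj (by omega) m hm)
        show ((pvAltRound dts (pvAltIter dts p)).get? m).isSome
        unfold pvAltRound
        rw [pvFold_mono dts m v dts.items _ hv]; simp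
      · -- k - j = p + 1: resolve m via its parent this pass
        obtain ⟨e, par, hg, hsql, hpar, hstep⟩ := pvOk_step dts m (hok j hj m hm)
        have hnext : pvIter dts (j+1) n0 = some par := by
          rw [pvIter_snoc, hm]; simpa using hstep
        show ((pvAltRound dts (pvAltIter dts p)).get? m).isSome
        unfold pvAltRound
        cases hr : (pvAltIter dts p).get? m with
        | some v => rw [pvFold_mono dts m v dts.items _ hr]; simp
        | none =>
          apply pvFold_hit dts m e dts.items _ (PySem.Dict.mem_items_of_get?_eq_some _ hg)
            (by simpa [PySem.Dict.keys] using hnd) hr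
          refine Or.inr ⟨par, hpar, ?_⟩
          cases hdp : dts.get? par with
          | none => exact Or.inl (by simp)
          | some e' =>
            refine Or.inr ?_
            rcases Nat.lt_or_ge (j+1) k with hjk1 | hjk1
            · exact hprogA (j+1) hjk1 (by omega) par hnext
            · have hjk1' : j + 1 = k := by omega
              rw [hjk1'] at hnext
              exact hprogB par hnext (by simp [hdp])
    · intro m hm hsome
      obtain ⟨v, hv⟩ := Option.isSome_iff_exists.mp (hprogB m hm hsome)
      show ((pvAltRound dts (pvAltIter dts p)).get? m).isSome
      unfold pvAltRound
      rw [pvFold_mono dts m v dts.items _ hv]; simp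

-- ===== VERDICT (by name: the statement is the Claim_ definition above) =====
theorem get_SQL_type_spec : Claim_equal_get_SQL_type := by
  unfold Claim_equal_get_SQL_type
  intro config datatype hdom hpre
  unfold Spec_get_SQL_type
  cases hcfg : pvLook config "datatype" with
  | none =>
    have h1 := hpre.1
    rw [hcfg] at h1
    simp at h1
  | some raw =>
    have hmemraw : raw ∈ pvLook config "datatype" := Option.mem_def.mpr hcfg
    have hnd := PySem.Dict.nodup_keys_ofList raw
    unfold get_SQL_type get_SQL_type_alt
    rw [hcfg]
    simp only []
    cases hdt : (PySem.Dict.ofList raw).get? datatype with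
    | none =>
      simp [pvGoA, hdt]
    | some e0 =>
      obtain ⟨k, hkmem, hokB, htermB⟩ := hpre.2 raw hmemraw (by rw [hdt]; simp)
      set dts := PySem.Dict.ofList raw with hdts
      set L := dts.items.length with hL
      have hkL : k ≤ L := by
        have := List.mem_range.mp hkmem; omega
      have hok : ∀ j < k, ∀ m, pvIter dts j datatype = some m → pvOkNode dts m = true := by
        intro j hj m hm
        have := hokB j (List.mem_range.mpr hj)
        rw [hm] at this
        simpa using this
      have hterm : ∀ m, pvIter dts k datatype = some m → pvTermNode dts m = true := by
        intro m hm
        rw [hm] at htermB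
        simpa using htermB
      obtain ⟨t, ht⟩ := Option.isSome_iff_exists.mp (pvIter_isSome dts k datatype hok)
      -- A's side
      rw [pvGoA_eval dts k datatype (L+1) t hok hterm (by omega) ht]
      -- B's side: the table after L passes holds the answer at datatype
      obtain ⟨hinv, _, hprogA, hprogB⟩ := pvProg dts hnd datatype k t hok hterm ht L
      have hsome : ((pvAltIter dts L).get? datatype).isSome := by
        rcases Nat.eq_zero_or_pos k with hk0 | hk0
        · subst hk0
          exact hprogB datatype (pvIter_zero dts datatype) (by rw [hdt]; simp)
        · exact hprogA 0 hk0 (by omega) datatype (pvIter_zero dts datatype)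
      obtain ⟨v, hv⟩ := Option.isSome_iff_exists.mp hsome
      have hveq : v = pvAns dts t := hinv 0 (Nat.zero_le k) datatype (pvIter_zero dts datatype) v hv
      rw [hv, hveq]
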